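-- pv_equiv track=rewrite | github.com/cirbuk/smartmails | myproject/app1.py | question_count
-- ===== SOURCE A (Python) =====
-- def question_count(tokens):
-- 	i = 0
-- 	count = 0
-- 	while i < len(tokens):
-- 		if tokens[i] == "?":
-- 			i += 1
-- 			count += 1
-- 			while i < len(tokens) and tokens[i] == "?":
-- 				i += 1
-- 		else:
-- 			i += 1
-- 	return count
-- ===== SOURCE B (Python) =====
-- def question_count(tokens):
--     count = 0
--     prev = None
--     for t in tokens:
--         if t == "?" and prev != "?":
--             count += 1
--         prev = t
--     return count
-- ===== Notes on version B (the rewrite author's own statement) =====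
-- stated objective: simpler
-- what changed: Replaces the index-driven outer while with a nested '?'-skipping inner while by a single for-loop that counts rising edges (a '?' whose predecessor is not '?'); the direct iteration avoids per-step len()/indexing overhead.
import Mathlib
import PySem

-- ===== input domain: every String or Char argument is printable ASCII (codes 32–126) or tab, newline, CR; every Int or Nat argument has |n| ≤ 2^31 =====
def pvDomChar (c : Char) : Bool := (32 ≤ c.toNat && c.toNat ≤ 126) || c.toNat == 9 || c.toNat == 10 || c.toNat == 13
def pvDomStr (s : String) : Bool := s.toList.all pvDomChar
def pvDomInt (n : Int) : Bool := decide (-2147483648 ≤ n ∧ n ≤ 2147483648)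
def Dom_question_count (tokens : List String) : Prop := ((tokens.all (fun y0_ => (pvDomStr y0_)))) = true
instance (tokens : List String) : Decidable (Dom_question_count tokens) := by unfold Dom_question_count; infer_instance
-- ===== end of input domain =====

-- B is a one-pass rising-edge count (a '?' whose predecessor is not '?'); same value, no inner skip loop.

-- ===== PORT A =====
-- inner while: while i < len(tokens) and tokens[i] == "?": i += 1
def qcSkip (tokens : List String) (i : Nat) : Nat :=
  if h : i < tokens.length then
    if tokens[i] = "?" then qcSkip tokens (i + 1) else i
  else i
termination_by tokens.length - i

theorem qcSkip_ge (tokens : List String) (i : Nat) : i ≤ qcSkip tokens i := by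
  unfold qcSkip
  split
  · split
    · exact le_trans (Nat.le_succ i) (qcSkip_ge tokens (i + 1))
    · exact le_refl i
  · exact le_refl i
termination_by tokens.length - i

-- outer while over index i and accumulator count
def qcLoop (tokens : List String) (i : Nat) (count : Int) : Int :=
  if h : i < tokens.length then
    if tokens[i] = "?" then qcLoop tokens (qcSkip tokens (i + 1)) (count + 1)
    else qcLoop tokens (i + 1) count
  else count
termination_by tokens.length - i
decreasing_by
  · have := qcSkip_ge tokens (i + 1); omega
  · omega

def question_count (tokens : List String) : Int := qcLoop tokens 0 0

-- ===== PORT B =====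
-- for t in tokens: if t == "?" and prev != "?": count += 1; prev = t
def question_count_alt (tokens : List String) : Int :=
  (tokens.foldl
    (fun (s : Int × Option String) t =>
      ((if t = "?" ∧ s.2 ≠ some "?" then s.1 + 1 else s.1), some t))
    (0, none)).1

-- ===== PRECONDITION & SPEC =====
def Spec_question_count (tokens : List String) (out : Int) : Prop := out = question_count_alt tokens
instance (tokens : List String) (out : Int) : Decidable (Spec_question_count tokens out) := by unfold Spec_question_count; infer_instance

-- ===== CLAIM (what is proved, stated in full; the proofs are below) =====
def Claim_equal_question_count : Prop := ∀ (tokens : List String), Dom_question_count tokens → Spec_question_count tokens (question_count tokens)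

-- ===== LEMMAS AND PROOFS =====

-- run count of a suffix, matching A's skip structure
def hRuns : List String → Int
  | [] => 0
  | t :: rest => if t = "?" then 1 + hRuns (rest.dropWhile (· = "?")) else hRuns rest
termination_by l => l.length
decreasing_by
  · have := List.length_dropWhile_le (p := fun x => decide (x = "?")) (l := rest)
    simp; omega
  · simp

-- rising-edge count given whether the previous token was "?"
def gEdges : Bool → List String → Int
  | _, [] => 0
  | prevQ, t :: rest =>
      (if t = "?" ∧ prevQ = false then 1 else 0) + gEdges (decide (t = "?")) rest

theorem foldl_gEdges (l : List String) (c : Int) (prev : Option String) :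
    (l.foldl
      (fun (s : Int × Option String) t =>
        ((if t = "?" ∧ s.2 ≠ some "?" then s.1 + 1 else s.1), some t))
      (c, prev)).1 = c + gEdges (decide (prev = some "?")) l := by
  induction l generalizing c prev with
  | nil => simp [gEdges]
  | cons t rest ih =>
      simp only [List.foldl_cons, gEdges]
      rw [ih]
      by_cases ht : t = "?" <;> by_cases hp : prev = some "?" <;>
        simp [ht, hp] <;> ring

theorem gEdges_eq (l : List String) :
    gEdges false l = hRuns l ∧ gEdges true l = hRuns (l.dropWhile (· = "?")) := by
  induction l with
  | nil => simp [gEdges, hRuns]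
  | cons t rest ih =>
      by_cases ht : t = "?"
      · constructor
        · simp [gEdges, hRuns, ht, ih.2]
        · simp [gEdges, List.dropWhile, ht, ih.2]
      · constructor
        · simp [gEdges, hRuns, ht, ih.1]
        · simp [gEdges, List.dropWhile, ht, hRuns, ih.1]

theorem qcSkip_drop (tokens : List String) (i : Nat) :
    tokens.drop (qcSkip tokens i) = (tokens.drop i).dropWhile (· = "?") := by
  unfold qcSkip
  split
  · rename_i h
    rw [List.drop_eq_getElem_cons h]
    split
    · rename_i hq
      rw [qcSkip_drop tokens (i + 1)]
      simp [List.dropWhile, hq]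
    · rename_i hq
      simp [List.dropWhile, hq]
  · rename_i h
    rw [List.drop_of_length_le (by omega)]
    simp
termination_by tokens.length - i

theorem qcLoop_eq (tokens : List String) (i : Nat) (count : Int) :
    qcLoop tokens i count = count + hRuns (tokens.drop i) := by
  fun_induction qcLoop tokens i count with
  | case1 i count h hq ih =>
      have hdrop : tokens.drop i = tokens[i] :: tokens.drop (i + 1) :=
        List.drop_eq_getElem_cons h
      rw [ih, qcSkip_drop, hdrop, hRuns]
      simp [hq]; ring
  | case2 i count h hq ih =>
      have hdrop : tokens.drop i = tokens[i] :: tokens.drop (i + 1) :=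
        List.drop_eq_getElem_cons h
      rw [ih, hdrop, hRuns]
      simp [hq]
  | case3 i count h =>
      rw [List.drop_of_length_le (by omega)]
      simp [hRuns]

-- ===== VERDICT (by name: the statement is the Claim_ definition above) =====
theorem question_count_spec : Claim_equal_question_count := by
  intro tokens _
  show question_count tokens = question_count_alt tokens
  rw [question_count, question_count_alt, qcLoop_eq, foldl_gEdges]
  simp [(gEdges_eq tokens).1]
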